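-- pv_equiv track=rewrite | github.com/purple4reina/advent-of-code-2021 | day15/day.py | process_part2
-- ===== SOURCE A (Python) =====
-- def process_part2(raw):
--     cave = []
--     for row_repeat in range(5):
--         for row in raw.split():
--             new_row = []
--             for col_repeat in range(5):
--                 for risk in row:
--                     new_val = int(risk) + row_repeat + col_repeat
--                     if new_val > 9:
--                         new_val -= 9
--                     new_row.append(new_val)
--             cave.append(new_row)
--     return cave
-- ===== SOURCE B (Python) =====
-- def process_part2(raw):
--     def bump(v):
--         return v - 9 if v > 9 else v
--     base = [[int(c) for c in row] for row in raw.split()]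
--     band = [[bump(v + k) for k in range(5) for v in r] for r in base]
--     cave = []
--     for _ in range(5):
--         cave.extend(band)
--         band = [[bump(v + 1) for v in r] for r in band]
--     return cave
-- ===== Notes on version B (the rewrite author's own statement) =====
-- stated objective: faster
-- what changed: B parses the digits once into a base grid, builds the first row-band as five column-shifted copies with the subtract-9 wrap, and derives each further row-band incrementally from the previous one by +1-with-wrap, instead of A's four nested loops re-parsing every character 25 times.
import Mathlib
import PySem

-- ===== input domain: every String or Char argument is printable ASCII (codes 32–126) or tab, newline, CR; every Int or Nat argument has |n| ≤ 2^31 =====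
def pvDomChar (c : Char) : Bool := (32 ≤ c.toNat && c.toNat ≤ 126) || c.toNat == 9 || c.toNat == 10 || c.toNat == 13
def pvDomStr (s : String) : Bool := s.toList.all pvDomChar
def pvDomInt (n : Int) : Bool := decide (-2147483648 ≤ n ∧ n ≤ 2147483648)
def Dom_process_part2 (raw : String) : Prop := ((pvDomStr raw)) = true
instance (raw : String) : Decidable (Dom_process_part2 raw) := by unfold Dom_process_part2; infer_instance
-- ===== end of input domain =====

-- B parses the digits once into a base grid, builds the first row-band as five column-shifted
-- wrapped copies, and derives each further band from the previous one by +1-with-wrap,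
-- instead of A's four nested loops re-parsing every character 25 times (objective: faster, constant factor).

-- ===== PORT A =====
def process_part2 (raw : String) : List (List Int) :=
  (PySem.List.pyRange 0 5 1).foldl (fun cave row_repeat =>
    (PySem.Str.split₀ raw).foldl (fun cave row =>
      cave ++ [(PySem.List.pyRange 0 5 1).foldl (fun new_row col_repeat =>
        row.toList.foldl (fun new_row risk =>
          let new_val := (PySem.Int.ofStr? (String.singleton risk)).getD 0 + row_repeat + col_repeat
          let new_val := if new_val > 9 then new_val - 9 else new_val
          new_row ++ [new_val]) new_row) []]) cave) []

-- ===== PORT B =====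
def pvBump (v : Int) : Int := if v > 9 then v - 9 else v

def process_part2_alt (raw : String) : List (List Int) :=
  let base := (PySem.Str.split₀ raw).map (fun row =>
    row.toList.map (fun c => (PySem.Int.ofStr? (String.singleton c)).getD 0))
  let band := base.map (fun r =>
    (PySem.List.pyRange 0 5 1).flatMap (fun k => r.map (fun v => pvBump (v + k))))
  let st := (PySem.List.pyRange 0 5 1).foldl
    (fun (st : List (List Int) × List (List Int)) _ =>
      (st.1 ++ st.2, st.2.map (fun r => r.map (fun v => pvBump (v + 1)))))
    (([] : List (List Int)), band)
  st.1

-- ===== PRECONDITION & SPEC =====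
-- Pre_ excludes exactly the inputs where A raises ValueError: some whitespace-separated
-- token of raw contains a non-digit character, on which int(risk) raises.
def Pre_process_part2 (raw : String) : Prop :=
  ((PySem.Str.split₀ raw).all (fun t => PySem.Str.strIsdigit t)) = true
instance (raw : String) : Decidable (Pre_process_part2 raw) := by unfold Pre_process_part2; infer_instance
def pvWitness_process_part2 : String := "19\n28"
def Spec_process_part2 (raw : String) (out : List (List Int)) : Prop := out = process_part2_alt raw
instance (raw : String) (out : List (List Int)) : Decidable (Spec_process_part2 raw out) := by unfold Spec_process_part2; infer_instance

-- ===== CLAIM (what is proved, stated in full; the proofs are below) =====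
def Claim_equal_process_part2 : Prop := ∀ (raw : String), Dom_process_part2 raw → Pre_process_part2 raw → Spec_process_part2 raw (process_part2 raw)

-- ===== LEMMAS AND PROOFS =====

-- value of int(c) for a single character
def pvValc (c : Char) : Int := (PySem.Int.ofStr? (String.singleton c)).getD 0

-- one output row of band i: five column-shifted wrapped copies of the parsed row
def pvRow (i : Int) (cs : List Char) : List Int :=
  ([0, 1, 2, 3, 4] : List Int).flatMap (fun k => cs.map (fun c => pvBump (pvValc c + i + k)))

lemma pv_digit_mem (c : Char) (h : PySem.Chars.isdigit c = true) :
    c ∈ ['0','1','2','3','4','5','6','7','8','9'] := by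
  simp [PySem.Chars.isdigit, Char.le_def] at h
  obtain ⟨h1, h2⟩ := h
  have h1' : 48 ≤ c.toNat := h1
  have h2' : c.toNat ≤ 57 := h2
  have hc : Char.ofNat c.toNat = c := Char.ofNat_toNat c
  interval_cases h : c.toNat <;> rw [← hc] <;> decide

lemma pv_digit_val (c : Char) (h : PySem.Chars.isdigit c = true) :
    0 ≤ pvValc c ∧ pvValc c ≤ 9 := by
  have := pv_digit_mem c h
  fin_cases this <;> decide

lemma pv_cell (v i k : Int) (h0 : 0 ≤ v) (h9 : v ≤ 9) (_hi : 0 ≤ i) (_hk : 0 ≤ k)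
    (hik : i + k ≤ 7) :
    pvBump (pvBump (v + i + k) + 1) = pvBump (v + (i + 1) + k) := by
  simp only [pvBump]
  split_ifs <;> omega

def pvBand (toks : List String) (i : Int) : List (List Int) :=
  toks.map (fun t => pvRow i t.toList)

def pvInc (b : List (List Int)) : List (List Int) :=
  b.map (fun r => r.map (fun v => pvBump (v + 1)))

lemma pv_row_step (i : Int) (hi : 0 ≤ i) (hi3 : i ≤ 3) (cs : List Char)
    (h : ∀ c ∈ cs, PySem.Chars.isdigit c = true) :
    (pvRow i cs).map (fun v => pvBump (v + 1)) = pvRow (i + 1) cs := by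
  simp only [pvRow, List.flatMap_cons, List.flatMap_nil, List.append_nil, List.map_append,
    List.map_map]
  have hpt : ∀ k : Int, 0 ≤ k → k ≤ 4 →
      (cs.map ((fun v => pvBump (v + 1)) ∘ (fun c => pvBump (pvValc c + i + k))))
        = cs.map (fun c => pvBump (pvValc c + (i + 1) + k)) := by
    intro k hk hk4
    apply List.map_congr_left
    intro c hc
    obtain ⟨h0, h9⟩ := pv_digit_val c (h c hc)
    show pvBump (pvBump (pvValc c + i + k) + 1) = pvBump (pvValc c + (i + 1) + k)
    exact pv_cell _ _ _ h0 h9 hi hk (by omega)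
  rw [hpt 0 le_rfl (by norm_num), hpt 1 (by norm_num) (by norm_num),
    hpt 2 (by norm_num) (by norm_num), hpt 3 (by norm_num) (by norm_num),
    hpt 4 (by norm_num) (by norm_num)]

lemma pv_band_step (toks : List String)
    (hd : ∀ t ∈ toks, ∀ c ∈ t.toList, PySem.Chars.isdigit c = true)
    (i : Int) (hi : 0 ≤ i) (hi3 : i ≤ 3) :
    pvInc (pvBand toks i) = pvBand toks (i + 1) := by
  unfold pvInc pvBand
  rw [List.map_map]
  apply List.map_congr_left
  intro t ht
  show (pvRow i t.toList).map (fun v => pvBump (v + 1)) = pvRow (i + 1) t.toList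
  exact pv_row_step i hi hi3 t.toList (hd t ht)

lemma pv_main (raw : String)
    (hd : ∀ t ∈ PySem.Str.split₀ raw, ∀ c ∈ t.toList, PySem.Chars.isdigit c = true) :
    process_part2 raw = process_part2_alt raw := by
  have h5 : PySem.List.pyRange 0 5 1 = ([0, 1, 2, 3, 4] : List Int) := by decide
  have e1 := pv_band_step _ hd 0 (by norm_num) (by norm_num)
  have e2 := pv_band_step _ hd 1 (by norm_num) (by norm_num)
  have e3 := pv_band_step _ hd 2 (by norm_num) (by norm_num)
  have e4 := pv_band_step _ hd 3 (by norm_num) (by norm_num)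
  norm_num at e1 e2 e3 e4
  have hA : process_part2 raw =
      pvBand (PySem.Str.split₀ raw) 0 ++ (pvBand (PySem.Str.split₀ raw) 1 ++
        (pvBand (PySem.Str.split₀ raw) 2 ++ (pvBand (PySem.Str.split₀ raw) 3 ++
          pvBand (PySem.Str.split₀ raw) 4))) := by
    simp only [process_part2, pvBand, pvRow, pvValc, pvBump, h5, List.foldl_cons, List.foldl_nil,
      PySem.List.foldl_append_singleton_eq_map, List.nil_append, List.append_assoc,
      List.flatMap_cons, List.flatMap_nil, List.append_nil, add_zero]
  have hB : process_part2_alt raw =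
      pvBand (PySem.Str.split₀ raw) 0 ++ (pvInc (pvBand (PySem.Str.split₀ raw) 0) ++
        (pvInc (pvInc (pvBand (PySem.Str.split₀ raw) 0)) ++
          (pvInc (pvInc (pvInc (pvBand (PySem.Str.split₀ raw) 0))) ++
            pvInc (pvInc (pvInc (pvInc (pvBand (PySem.Str.split₀ raw) 0))))))) := by
    simp only [process_part2_alt, pvInc, pvBand, pvRow, pvValc, pvBump, h5, List.foldl_cons,
      List.foldl_nil, List.flatMap_cons, List.flatMap_nil, List.append_nil, List.nil_append,
      List.append_assoc, List.map_append, List.map_map, Function.comp_def, add_zero]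
  rw [e1, e2, e3, e4] at hB
  rw [hA, hB]

-- ===== VERDICT (by name: the statement is the Claim_ definition above) =====
theorem process_part2_spec : Claim_equal_process_part2 := by
  intro raw _hdom hpre
  unfold Spec_process_part2
  apply pv_main
  intro t ht c hc
  unfold Pre_process_part2 at hpre
  rw [List.all_eq_true] at hpre
  have := hpre t ht
  rw [PySem.Str.strIsdigit_eq] at this
  simp [PySem.Chars.strIsdigit, List.all_eq_true] at this
  exact this.2 c hc
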